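-- pv_equiv track=rewrite | github.com/neoseurae12/python_algorithm | baekjoon_1316-1_group-word-checker.py | group_word_checker
-- ===== SOURCE A (Python) =====
-- import collections
--
-- def group_word_checker(n: int, words: list) -> int:
--     answer = 0
--
--     for word in words:
--         word_dict = collections.Counter(word)
--         answer += 1
--
--         for i in range(len(word) - 1):
--             prev_alphabet = word[i]  # h a p p
--             now_alphabet = word[i + 1]  # a p p y
--
--             word_dict[prev_alphabet] -= 1  # {h:0, a:0, p: 0, y:1}
--
--             if prev_alphabet != now_alphabet:
--                 if word_dict[prev_alphabet] != 0:
--                     answer -= 1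
--                     break
--
--     return answer
-- ===== SOURCE B (Python) =====
-- def group_word_checker(n: int, words: list) -> int:
--     count = 0
--     for word in words:
--         seen = set()   # letters that have started a block so far (incl. the current one)
--         prev = None
--         good = True
--         for ch in word:
--             if ch == prev:
--                 continue
--             if ch in seen:
--                 good = False
--                 break
--             seen.add(ch)
--             prev = ch
--         if good:
--             count += 1
--     return count
-- ===== Notes on version B (the rewrite author's own statement) =====
-- stated objective: idiomatic
-- what changed: Replaces A's per-word Counter built up front and decremented along an indexed lookahead walk by a single forward pass tracking the previous character and a set of block-starting letters, rejecting a word as soon as a letter re-opens a block.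
import Mathlib
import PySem

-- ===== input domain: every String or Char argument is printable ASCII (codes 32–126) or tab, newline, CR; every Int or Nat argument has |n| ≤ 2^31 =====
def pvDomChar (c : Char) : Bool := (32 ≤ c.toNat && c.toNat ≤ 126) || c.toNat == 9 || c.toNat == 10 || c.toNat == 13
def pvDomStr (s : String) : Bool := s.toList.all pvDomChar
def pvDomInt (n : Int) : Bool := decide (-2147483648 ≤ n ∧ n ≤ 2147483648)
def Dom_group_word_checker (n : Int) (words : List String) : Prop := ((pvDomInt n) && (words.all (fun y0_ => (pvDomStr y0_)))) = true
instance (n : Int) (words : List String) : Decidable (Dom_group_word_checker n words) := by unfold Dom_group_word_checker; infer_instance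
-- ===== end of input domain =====

-- B replaces the per-word Counter-decrement walk by a forward pass with a set of block-start letters (idiomatic; same cost).

-- ===== PORT A =====
-- inner 'for i in range(len(word)-1)' loop: returns -1 on break (answer -= 1), 0 if the loop runs out
def pvAGo (cs : List Char) (d : PySem.Dict Char Int) : List Int → Int
  | [] => 0
  | i :: rest =>
      let prev := PySem.List.pyGetD cs i ' '        -- word[i], always in range here
      let now := PySem.List.pyGetD cs (i + 1) ' '   -- word[i+1], always in range here
      let d' := d.modify prev 0 (· - 1)             -- word_dict[prev] -= 1 (Counter: missing = 0)
      if prev ≠ now then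
        if d'.getD prev 0 ≠ 0 then -1 else pvAGo cs d' rest
      else pvAGo cs d' rest

def group_word_checker (n : Int) (words : List String) : Int :=
  words.foldl (fun answer w =>
    let cs := w.toList
    let d := PySem.Dict.counter cs                  -- collections.Counter(word)
    (answer + 1) + pvAGo cs d (PySem.List.pyRange 0 ((cs.length : Int) - 1) 1)) 0

-- ===== PORT B =====
def pvBGo (seen : PySem.Set Char) (prev : Option Char) : List Char → Bool
  | [] => true
  | c :: t =>
      if some c = prev then pvBGo seen prev t
      else if PySem.Set.contains seen c then false
      else pvBGo (PySem.Set.add seen c) (some c) t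

def group_word_checker_alt (n : Int) (words : List String) : Int :=
  words.foldl (fun count w =>
    if pvBGo PySem.Set.empty none w.toList then count + 1 else count) 0

-- ===== PRECONDITION & SPEC =====
def Spec_group_word_checker (n : Int) (words : List String) (out : Int) : Prop := out = group_word_checker_alt n words
instance (n : Int) (words : List String) (out : Int) : Decidable (Spec_group_word_checker n words out) := by unfold Spec_group_word_checker; infer_instance

-- ===== CLAIM (what is proved, stated in full; the proofs are below) =====
def Claim_equal_group_word_checker : Prop := ∀ (n : Int) (words : List String), Dom_group_word_checker n words → Spec_group_word_checker n words (group_word_checker n words)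

-- ===== LEMMAS AND PROOFS =====

-- common reference predicate: 'the word is a group word', structural on the character list
def pvRec : List Char → Bool
  | a :: b :: t => if a ≠ b ∧ a ∈ b :: t then false else pvRec (b :: t)
  | _ => true

-- run-compressed tail starting after a block of p
def pvDedupFrom (p : Char) : List Char → List Char
  | [] => []
  | c :: t => if c = p then pvDedupFrom p t else c :: pvDedupFrom c t

lemma pvRec_short (l : List Char) (h : l.length ≤ 1) : pvRec l = true := by
  match l with
  | [] => rfl
  | [a] => rfl
  | a :: b :: t => simp at h

lemma mem_pvDedupFrom (x p : Char) (l : List Char) (hx : x ≠ p) :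
    x ∈ pvDedupFrom p l ↔ x ∈ l := by
  induction l generalizing p with
  | nil => simp [pvDedupFrom]
  | cons c t ih =>
      by_cases hc : c = p
      · subst hc
        simp [pvDedupFrom, hx, ih c hx]
      · by_cases hxc : x = c
        · subst hxc; simp [pvDedupFrom, hc]
        · simp [pvDedupFrom, hc, hxc, ih c hxc]

lemma pvRec_iff_nodup (t : List Char) : ∀ a : Char,
    (pvRec (a :: t) = true ↔ (a :: pvDedupFrom a t).Nodup) := by
  induction t with
  | nil => intro a; simp [pvRec, pvDedupFrom]
  | cons b t' ih =>
      intro a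
      by_cases hab : a = b
      · subst hab
        simpa [pvRec, pvDedupFrom] using ih a
      · have hba : ¬ b = a := fun h => hab h.symm
        have hdd : pvDedupFrom a (b :: t') = b :: pvDedupFrom b t' := by
          simp only [pvDedupFrom]; rw [if_neg hba]
        have hmem : a ∈ pvDedupFrom b t' ↔ a ∈ t' := mem_pvDedupFrom a b t' hab
        rw [hdd]
        by_cases hat : a ∈ t'
        · have hcond : a ≠ b ∧ a ∈ b :: t' := ⟨hab, List.mem_cons_of_mem _ hat⟩
          have hl : pvRec (a :: b :: t') = false := by
            simp only [pvRec]; rw [if_pos hcond]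
          have hr : ¬ (a :: b :: pvDedupFrom b t').Nodup := by
            intro hnd
            exact (List.nodup_cons.mp hnd).1 (List.mem_cons_of_mem _ (hmem.mpr hat))
          simp [hl, hr]
        · have hcond : ¬ (a ≠ b ∧ a ∈ b :: t') := by
            rintro ⟨_, hin⟩
            rcases List.mem_cons.mp hin with h1 | h2
            · exact hab h1
            · exact hat h2
          have hl : pvRec (a :: b :: t') = pvRec (b :: t') := by
            simp only [pvRec]; rw [if_neg hcond]
          have hnotin : a ∉ b :: pvDedupFrom b t' := by
            intro h
            rcases List.mem_cons.mp h with h1 | h2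
            · exact hab h1
            · exact hat (hmem.mp h2)
          rw [hl, ih b]
          constructor
          · intro h; exact List.nodup_cons.mpr ⟨hnotin, h⟩
          · intro h; exact (List.nodup_cons.mp h).2

lemma pvBGo_iff (cs : List Char) : ∀ (seen : PySem.Set Char) (p : Char), seen.Nodup →
    (pvBGo seen (some p) cs = true ↔ (seen ++ pvDedupFrom p cs).Nodup) := by
  induction cs with
  | nil => intro seen p h; simp [pvBGo, pvDedupFrom, h]
  | cons c t ih =>
      intro seen p h
      by_cases hc : c = p
      · subst hc
        simpa [pvBGo, pvDedupFrom] using ih seen c h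
      · have hne : ¬ (some c = some p) := by simp [hc]
        have hdd : pvDedupFrom p (c :: t) = c :: pvDedupFrom c t := by
          simp only [pvDedupFrom]; rw [if_neg hc]
        rw [hdd]
        by_cases hmem : c ∈ seen
        · have hcon : PySem.Set.contains seen c = true := by simpa using hmem
          have hl : pvBGo seen (some p) (c :: t) = false := by
            simp only [pvBGo]; rw [if_neg hne, if_pos hcon]
          have hr : ¬ (seen ++ c :: pvDedupFrom c t).Nodup := by
            intro hnd
            have hdisj := (List.nodup_append.mp hnd).2.2
            exact hdisj c hmem c (by simp) rfl
          simp [hl, hr]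
        · have hcon : ¬ PySem.Set.contains seen c = true := by simpa using hmem
          have hadd : PySem.Set.add seen c = seen ++ [c] := PySem.Set.add_of_not_mem hmem
          have hnd' : (seen ++ [c]).Nodup := by
            rw [List.nodup_append]
            refine ⟨h, List.nodup_singleton c, ?_⟩
            intro a ha b hb hab
            simp at hb
            subst hb
            exact hmem (hab ▸ ha)
          have hl : pvBGo seen (some p) (c :: t)
              = pvBGo (seen ++ [c]) (some c) t := by
            simp only [pvBGo]; rw [if_neg hne, if_neg hcon, hadd]
          rw [hl, ih (seen ++ [c]) c hnd']
          simp

lemma pvAlt_eq_pvRec (cs : List Char) :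
    pvBGo PySem.Set.empty none cs = pvRec cs := by
  match cs with
  | [] => rfl
  | a :: t =>
      have h1 : pvBGo PySem.Set.empty none (a :: t)
          = pvBGo (PySem.Set.add PySem.Set.empty a) (some a) t := by
        simp [pvBGo, PySem.Set.contains_eq_listContains, PySem.Set.empty]
      have hadd : PySem.Set.add PySem.Set.empty a = [a] := by
        exact PySem.Set.add_of_not_mem (s := PySem.Set.empty) (x := a) (by simp [PySem.Set.empty])
      have h2 := pvBGo_iff t [a] a (by simp)
      have h3 := pvRec_iff_nodup t a
      rw [h1, hadd]
      have : ([a] ++ pvDedupFrom a t) = a :: pvDedupFrom a t := rfl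
      rw [this] at h2
      by_cases hnd : (a :: pvDedupFrom a t).Nodup
      · rw [(h2.mpr hnd), (h3.mpr hnd)]
      · have hb : pvBGo [a] (some a) t = false := by
          cases hb : pvBGo [a] (some a) t
          · rfl
          · exact absurd (h2.mp hb) hnd
        have hr : pvRec (a :: t) = false := by
          cases hr : pvRec (a :: t)
          · rfl
          · exact absurd (h3.mp hr) hnd
        rw [hb, hr]

lemma pvAGo_eq (m : Nat) : ∀ (cs : List Char) (k : Nat) (d : PySem.Dict Char Int),
    cs.length - k ≤ m →
    (∀ c : Char, d.getD c 0 = ((cs.drop k).count c : Int)) →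
    pvAGo cs d (PySem.List.pyRange (k : Int) ((cs.length : Int) - 1) 1)
      = (if pvRec (cs.drop k) then 0 else -1) := by
  induction m with
  | zero =>
      intro cs k d hm _
      have hk : cs.length ≤ k := by omega
      have hnil : PySem.List.pyRange (k : Int) ((cs.length : Int) - 1) 1 = [] :=
        PySem.List.pyRange_one_eq_nil (by omega)
      have hdrop : cs.drop k = [] := List.drop_eq_nil_of_le hk
      rw [hnil, hdrop]
      simp [pvAGo, pvRec]
  | succ m ih =>
      intro cs k d hm hinv
      by_cases hlt : (k : Int) < (cs.length : Int) - 1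
      · -- k + 1 < cs.length
        have hk1 : k + 1 < cs.length := by omega
        have hk0 : k < cs.length := by omega
        have hcons : PySem.List.pyRange (k : Int) ((cs.length : Int) - 1) 1
            = (k : Int) :: PySem.List.pyRange ((k : Int) + 1) ((cs.length : Int) - 1) 1 :=
          PySem.List.pyRange_one_cons hlt
        set a := cs[k]'hk0 with ha
        set b := cs[k + 1]'hk1 with hb
        have hga : PySem.List.pyGetD cs (k : Int) ' ' = a := by
          rw [PySem.List.pyGetD_natCast]; exact List.getD_eq_getElem cs ' ' hk0
        have hgb : PySem.List.pyGetD cs ((k : Int) + 1) ' ' = b := by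
          have : ((k : Int) + 1) = ((k + 1 : Nat) : Int) := by push_cast; ring
          rw [this, PySem.List.pyGetD_natCast]
          exact List.getD_eq_getElem cs ' ' hk1
        have hdropk : cs.drop k = a :: cs.drop (k + 1) := (List.getElem_cons_drop hk0).symm
        have hdropk1 : cs.drop (k + 1) = b :: cs.drop (k + 2) := (List.getElem_cons_drop hk1).symm
        have hinv' : ∀ c : Char, (d.modify a 0 (· - 1)).getD c 0 = ((cs.drop (k + 1)).count c : Int) := by
          intro x
          rw [PySem.Dict.getD_modify]
          by_cases hxa : x = a
          · rw [if_pos hxa, hinv a, hdropk, hxa]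
            rw [List.count_cons_self]
            push_cast
            ring_nf
          · rw [if_neg hxa, hinv x, hdropk]
            have hax : ¬ a = x := fun h => hxa h.symm
            simp [hax]
        rw [hcons]
        simp only [pvAGo, hga, hgb]
        have hcount : (d.modify a 0 (· - 1)).getD a 0 = ((cs.drop (k + 1)).count a : Int) := hinv' a
        by_cases hab : a = b
        · -- prev = now: no break test, recurse
          have hrec : pvRec (cs.drop k) = pvRec (cs.drop (k + 1)) := by
            rw [hdropk, hdropk1, ← hab]
            simp [pvRec]
          rw [if_neg (by simp [hab])]
          have : ((k : Int) + 1) = ((k + 1 : Nat) : Int) := by push_cast; ring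
          rw [this, ih cs (k + 1) _ (by omega) hinv', hrec]
        · rw [if_pos hab]
          by_cases hmem : a ∈ cs.drop (k + 1)
          · have hne0 : (d.modify a 0 (· - 1)).getD a 0 ≠ 0 := by
              rw [hcount]
              have := List.count_pos_iff.mpr hmem
              omega
            rw [if_pos hne0]
            have : pvRec (cs.drop k) = false := by
              rw [hdropk, hdropk1]
              have : a ≠ b ∧ a ∈ b :: cs.drop (k + 2) := ⟨hab, by rw [← hdropk1]; exact hmem⟩
              simp [pvRec, this]
            rw [this]; simp
          · have he0 : ¬ (d.modify a 0 (· - 1)).getD a 0 ≠ 0 := by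
              rw [hcount]
              simp [List.count_eq_zero_of_not_mem hmem]
            rw [if_neg he0]
            have hrec : pvRec (cs.drop k) = pvRec (cs.drop (k + 1)) := by
              rw [hdropk, hdropk1]
              have hcond : ¬ (a ≠ b ∧ a ∈ b :: cs.drop (k + 2)) := by
                rintro ⟨_, hin⟩
                exact hmem (by rw [hdropk1]; exact hin)
              simp only [pvRec]
              rw [if_neg hcond]
            have : ((k : Int) + 1) = ((k + 1 : Nat) : Int) := by push_cast; ring
            rw [this, ih cs (k + 1) _ (by omega) hinv', hrec]
      · have hnil : PySem.List.pyRange (k : Int) ((cs.length : Int) - 1) 1 = [] :=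
          PySem.List.pyRange_one_eq_nil (by omega)
        have hshort : (cs.drop k).length ≤ 1 := by
          rw [List.length_drop]; omega
        rw [hnil]
        simp [pvAGo, pvRec_short _ hshort]

lemma pvWord_eq (answer : Int) (w : String) :
    (answer + 1) + pvAGo w.toList (PySem.Dict.counter w.toList)
        (PySem.List.pyRange 0 ((w.toList.length : Int) - 1) 1)
      = (if pvBGo PySem.Set.empty none w.toList then answer + 1 else answer) := by
  have h0 : ((0 : Nat) : Int) = 0 := rfl
  have := pvAGo_eq w.toList.length w.toList 0 (PySem.Dict.counter w.toList)
    (by omega) (fun c => by simpa using PySem.Dict.getD_counter (xs := w.toList) (v := c))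
  rw [h0] at this
  rw [this, pvAlt_eq_pvRec]
  by_cases h : pvRec w.toList = true
  · simp [h]
  · simp only [Bool.not_eq_true] at h
    simp [h]

lemma pv_fold (ws : List String) : ∀ acc : Int,
    ws.foldl (fun answer w => (answer + 1) + pvAGo w.toList (PySem.Dict.counter w.toList)
        (PySem.List.pyRange 0 ((w.toList.length : Int) - 1) 1)) acc
      = ws.foldl (fun count w => if pvBGo PySem.Set.empty none w.toList then count + 1 else count) acc := by
  induction ws with
  | nil => intro acc; rfl
  | cons w ws ih =>
      intro acc
      simp only [List.foldl_cons]
      rw [pvWord_eq acc w, ih]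

theorem pv_main (n : Int) (words : List String) :
    group_word_checker n words = group_word_checker_alt n words := by
  unfold group_word_checker group_word_checker_alt
  exact pv_fold words 0

-- ===== VERDICT (by name: the statement is the Claim_ definition above) =====
theorem group_word_checker_spec : Claim_equal_group_word_checker := by
  intro n words _
  unfold Spec_group_word_checker
  exact pv_main n words
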